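-- pv_equiv track=rewrite | github.com/Aditya-Agrawal-07/COL100-Assignments | 2021AM10198_ASSIGNMENT7/2021AM10198-q3.py | asc
-- ===== SOURCE A (Python) =====
-- def asc(inpt : str) -> str:
--     A=[]
--     for k in inpt:
--         A.append(k)
--     B=[]
--     C=[]
--     D=[]
--     X=""
--     for i in A:
--         if i=="1" or i=="2" or i=="3" or i=="4" or i=="5" or i=="6" or i=="7" or i=="8" or i=="9" or i=="0":
--             c=0
--             for j in range(0,len(A)):
--                 if i==A[j]:
--                     c+=1
--             if c%2!=0:
--                 B.append(int(i))
--             else: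
--                 C.append(i)
--         else:
--             C.append(i)
--     B.sort()
--     for n in B:
--         D.append(str(n))
--     D.extend(C)
--     for m in D:
--         X+=m
--     return X
-- ===== SOURCE B (Python) =====
-- def asc(inpt: str) -> str:
--     cnt = {}
--     for ch in inpt:
--         cnt[ch] = cnt.get(ch, 0) + 1
--     prefix = []
--     for d in "0123456789":
--         n = cnt.get(d, 0)
--         if n % 2 != 0:
--             prefix.append(d * n)
--     rest = [ch for ch in inpt if not ('0' <= ch <= '9') or cnt[ch] % 2 == 0]
--     return "".join(prefix) + "".join(rest)
-- ===== Notes on version B (the rewrite author's own statement) =====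
-- stated objective: faster
-- what changed: A recounts each character's occurrences with a nested scan and then sorts the odd-count digits; B builds one frequency table in a single pass and emits the sorted odd-count-digit prefix by sweeping digit values 0..9, with no sort and no inner scan.
import Mathlib
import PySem

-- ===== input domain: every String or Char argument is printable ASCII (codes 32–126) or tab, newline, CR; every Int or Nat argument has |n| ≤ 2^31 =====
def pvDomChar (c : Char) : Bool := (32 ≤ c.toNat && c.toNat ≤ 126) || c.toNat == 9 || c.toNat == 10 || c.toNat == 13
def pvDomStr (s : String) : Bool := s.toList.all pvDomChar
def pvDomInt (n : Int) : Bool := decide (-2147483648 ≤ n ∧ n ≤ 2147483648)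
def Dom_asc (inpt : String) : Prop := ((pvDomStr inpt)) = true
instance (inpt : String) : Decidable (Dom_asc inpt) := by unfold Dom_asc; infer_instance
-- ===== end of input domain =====

-- B replaces A's quadratic per-character recount and explicit sort by one frequency table
-- and a 0..9 sweep that emits the sorted odd-count-digit prefix without sorting.

-- ===== PORT A =====
-- i=="1" or i=="2" or ... or i=="0"
def ascDigit (i : Char) : Bool :=
  i == '1' || i == '2' || i == '3' || i == '4' || i == '5' ||
  i == '6' || i == '7' || i == '8' || i == '9' || i == '0'

-- c=0 ; for j in range(0,len(A)): if i==A[j]: c+=1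
def ascCount (A : List Char) (i : Char) : Int :=
  (PySem.List.pyRange 0 (PySem.List.len A) 1).foldl
    (fun c j => if i == PySem.List.pyGetD A j ' ' then c + 1 else c) 0

-- the body of A's main loop, acting on the pair (B, C)
def ascStep (A : List Char) (s : List Int × List Char) (i : Char) : List Int × List Char :=
  if ascDigit i then
    if PySem.Int.mod (ascCount A i) 2 ≠ 0 then
      -- int(i): this branch guarantees i is an ASCII digit, so ofChars? is some
      (s.1 ++ [(PySem.Int.ofChars? [i]).getD 0], s.2)
    else (s.1, s.2 ++ [i])
  else (s.1, s.2 ++ [i])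

def asc (inpt : String) : String :=
  let A : List Char := inpt.toList.foldl (fun acc k => acc ++ [k]) []
  let BC : List Int × List Char := A.foldl (ascStep A) ([], [])
  let B : List Int := PySem.List.sorted BC.1 (fun x => x) false
  let D : List (List Char) := B.foldl (fun acc n => acc ++ [PySem.Int.toChars n]) []
  let D2 : List (List Char) := D ++ BC.2.map (fun m => [m])
  String.mk (D2.foldl (fun acc m => acc ++ m) [])

-- ===== PORT B =====
def asc_alt (inpt : String) : String :=
  let cnt : PySem.Dict Char Int :=
    inpt.toList.foldl (fun d ch => d.insert ch (d.getD ch 0 + 1)) PySem.Dict.empty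
  let pre : List (List Char) :=
    "0123456789".toList.foldl (fun acc d =>
      if PySem.Int.mod (cnt.getD d 0) 2 ≠ 0 then
        acc ++ [PySem.List.pyRepeat [d] (cnt.getD d 0)]
      else acc) []
  let rest : List Char :=
    inpt.toList.filter (fun ch =>
      decide (¬('0' ≤ ch ∧ ch ≤ '9') ∨ PySem.Int.mod (cnt.getD ch 0) 2 = 0))
  String.mk (pre.flatten ++ rest)

-- ===== PRECONDITION & SPEC =====
def Spec_asc (inpt : String) (out : String) : Prop := out = asc_alt inpt
instance (inpt : String) (out : String) : Decidable (Spec_asc inpt out) := by unfold Spec_asc; infer_instance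

-- ===== CLAIM (what is proved, stated in full; the proofs are below) =====
def Claim_equal_asc : Prop := ∀ (inpt : String), Dom_asc inpt → Spec_asc inpt (asc inpt)

-- ===== LEMMAS AND PROOFS =====
def dchars : List Char := ['0','1','2','3','4','5','6','7','8','9']

def dval (i : Char) : Int := (PySem.Int.ofChars? [i]).getD 0

def oddB (L : List Char) (d : Char) : Bool :=
  decide (PySem.Int.mod ((L.count d : Nat) : Int) 2 ≠ 0)

def fcnt (L : List Char) (d : Char) : Nat := if oddB L d then L.count d else 0

def charYs (L : List Char) : List Char := dchars.flatMap (fun d => List.replicate (fcnt L d) d)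

def pOddB (L : List Char) (i : Char) : Bool := ascDigit i && oddB L i

lemma mem_dchars_of_le (i : Char) (h1 : '0' ≤ i) (h2 : i ≤ '9') : i ∈ dchars := by
  rw [Char.le_def, UInt32.le_iff_toNat_le] at h1 h2
  have e1 : ('0' : Char).val.toNat = 48 := rfl
  have e2 : ('9' : Char).val.toNat = 57 := rfl
  rw [e1] at h1
  rw [e2] at h2
  have e : i = Char.ofNat i.val.toNat := (Char.ofNat_toNat i).symm
  set n := i.val.toNat with hn
  interval_cases n <;> (rw [e]; decide)

lemma ascDigit_iff_mem (i : Char) : ascDigit i = true ↔ i ∈ dchars := by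
  simp [ascDigit, dchars]; tauto

lemma ascDigit_le (i : Char) : ascDigit i = decide ('0' ≤ i ∧ i ≤ '9') := by
  by_cases h : ('0' ≤ i ∧ i ≤ '9')
  · simp only [h]
    exact (ascDigit_iff_mem i).mpr (mem_dchars_of_le i h.1 h.2)
  · simp only [h, decide_false]
    rw [Bool.eq_false_iff]
    intro hc
    have := (ascDigit_iff_mem i).mp hc
    apply h
    fin_cases this <;> exact ⟨by decide, by decide⟩

lemma ascCount_eq (L : List Char) (i : Char) : ascCount L i = (L.count i : Int) := by
  unfold ascCount
  rw [PySem.List.foldl_pyRange_zero_pyGetD L ' ' (fun c x => if i == x then c + 1 else c) 0]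
  have h : (fun (c : Int) (x : Char) => if i == x then c + 1 else c)
      = (fun (c : Int) (x : Char) => if x == i then c + 1 else c) := by
    funext c x
    by_cases hx : x = i
    · subst hx; rfl
    · rw [if_neg (by simpa using Ne.symm hx), if_neg (by simpa using hx)]
  rw [h, PySem.List.foldl_beq_add_one]
  simp

lemma step_eq (L : List Char) (s : List Int × List Char) (i : Char) :
    ascStep L s i = (if pOddB L i then s.1 ++ [dval i] else s.1,
                     if pOddB L i then s.2 else s.2 ++ [i]) := by
  unfold ascStep pOddB dval
  rw [ascCount_eq]
  by_cases h1 : ascDigit i = true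
  · by_cases h2 : PySem.Int.mod ((L.count i : Nat) : Int) 2 ≠ 0
    · have hb : (ascDigit i && oddB L i) = true := by
        rw [h1, Bool.true_and]; unfold oddB; simpa using h2
      rw [if_pos h1, if_pos h2, if_pos hb, if_pos hb]
    · have hb : ¬((ascDigit i && oddB L i) = true) := by
        rw [h1, Bool.true_and]; unfold oddB; simpa using h2
      rw [if_pos h1, if_neg h2, if_neg hb, if_neg hb]
  · have hb : ¬((ascDigit i && oddB L i) = true) := by
      simp [h1]
    rw [if_neg h1, if_neg hb, if_neg hb]

lemma BC_eq (L : List Char) :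
    L.foldl (ascStep L) (([], []) : List Int × List Char)
      = ((L.filter (pOddB L)).map dval, L.filter (fun i => !pOddB L i)) := by
  have h1 : L.foldl (ascStep L) (([], []) : List Int × List Char)
      = L.foldl (fun (s : List Int × List Char) i =>
          (if pOddB L i then s.1 ++ [dval i] else s.1,
           if pOddB L i then s.2 else s.2 ++ [i])) ([], []) := by
    apply PySem.List.foldl_congr_mem
    intro acc x _
    exact step_eq L acc x
  rw [h1, PySem.List.foldl_prod_mk
        (f := fun b i => if pOddB L i then b ++ [dval i] else b)
        (g := fun c i => if pOddB L i then c else c ++ [i])]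
  congr 1
  · rw [PySem.List.foldl_append_if (pOddB L) dval]; simp
  · have h2 : L.foldl (fun (c : List Char) i => if pOddB L i then c else c ++ [i]) []
        = L.foldl (fun (c : List Char) i => if !pOddB L i then c ++ [i] else c) [] := by
      apply PySem.List.foldl_congr_mem
      intro acc x _
      cases hb : pOddB L x <;> simp [hb]
    rw [h2, PySem.List.foldl_append_if_eq_filter]; simp

lemma charYs_perm (L : List Char) : (charYs L).Perm (L.filter (pOddB L)) := by
  rw [List.perm_iff_count]
  intro x
  by_cases hx : pOddB L x = true
  · rw [List.count_filter hx]
    obtain ⟨hdig, hodd⟩ : ascDigit x = true ∧ oddB L x = true := by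
      simpa [pOddB] using hx
    have hmem := (ascDigit_iff_mem x).mp hdig
    fin_cases hmem <;>
      simp_all [charYs, dchars, List.count_append, List.count_replicate, fcnt]
  · have hxm : x ∉ L.filter (pOddB L) := by
      intro hc
      exact hx (List.of_mem_filter hc)
    rw [List.count_eq_zero.mpr hxm]
    by_cases hdig : ascDigit x = true
    · have hodd : oddB L x = false := by
        cases hb : oddB L x
        · rfl
        · exact absurd (by unfold pOddB; rw [hdig, hb]; rfl) hx
      have hmem := (ascDigit_iff_mem x).mp hdig
      fin_cases hmem <;>
        simp_all [charYs, dchars, List.count_append, List.count_replicate, fcnt]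
    · have hne : x ∉ dchars := fun hc => hdig ((ascDigit_iff_mem x).mpr hc)
      simp only [dchars, List.mem_cons, List.not_mem_nil, or_false] at hne
      push Not at hne
      simp [charYs, dchars, List.count_append, List.count_replicate]
      obtain ⟨n0, n1, n2, n3, n4, n5, n6, n7, n8, n9⟩ := hne
      simp [Ne.symm n0, Ne.symm n1, Ne.symm n2, Ne.symm n3, Ne.symm n4,
            Ne.symm n5, Ne.symm n6, Ne.symm n7, Ne.symm n8, Ne.symm n9]

lemma pairwise_flatMap_replicate {α : Type} (r : α → α → Prop) (f : α → Nat) :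
    ∀ (ds : List α), (∀ d ∈ ds, r d d) → ds.Pairwise r →
      (ds.flatMap fun d => List.replicate (f d) d).Pairwise r := by
  intro ds
  induction ds with
  | nil => intro _ _; simp
  | cons a t ih =>
    intro hrefl hp
    rw [List.pairwise_cons] at hp
    simp only [List.flatMap_cons]
    rw [List.pairwise_append]
    refine ⟨?_, ih (fun d hd => hrefl d (List.mem_cons_of_mem _ hd)) hp.2, ?_⟩
    · exact List.pairwise_replicate.mpr (Or.inr (hrefl a List.mem_cons_self))
    · intro x hx y hy
      have hxa : x = a := List.eq_of_mem_replicate hx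
      rw [List.mem_flatMap] at hy
      obtain ⟨e, he, hye⟩ := hy
      have hye' : y = e := List.eq_of_mem_replicate hye
      rw [hxa, hye']
      exact hp.1 e he

lemma mem_charYs (L : List Char) (x : Char) (h : x ∈ charYs L) : x ∈ dchars := by
  unfold charYs at h
  rw [List.mem_flatMap] at h
  obtain ⟨d, hd, hx⟩ := h
  rw [List.eq_of_mem_replicate hx]
  exact hd

lemma toChars_dval (x : Char) (h : x ∈ dchars) : PySem.Int.toChars (dval x) = [x] := by
  fin_cases h <;> decide

lemma sorted_eq (L : List Char) :
    PySem.List.sorted ((L.filter (pOddB L)).map dval) (fun x => x) false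
      = (charYs L).map dval := by
  apply PySem.List.sorted_id_eq_of_perm_of_pairwise
  · exact (charYs_perm L).map dval
  · rw [List.pairwise_map]
    apply pairwise_flatMap_replicate
    · intro d _; exact le_refl _
    · unfold dchars; decide

lemma flatten_map_singleton {α : Type} (l : List α) : (l.map (fun x => [x])).flatten = l := by
  induction l <;> simp_all

lemma flatten_filter_map {α β : Type} (p : α → Bool) (g : α → List β) (l : List α) :
    ((l.filter p).map g).flatten = l.flatMap (fun x => if p x then g x else []) := by
  induction l with
  | nil => simp
  | cons a t ih => by_cases h : p a <;> simp [h, ih]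

lemma getD_cnt (L : List Char) (ch : Char) :
    (L.foldl (fun d ch => d.insert ch (d.getD ch 0 + 1)) PySem.Dict.empty).getD ch 0
      = ((L.count ch : Nat) : Int) := by
  rw [PySem.Dict.getD_foldl_insert_add_one]
  simp [PySem.Dict.getD_empty]

lemma rest_pt (L : List Char) (i : Char) :
    (!pOddB L i) = decide (¬('0' ≤ i ∧ i ≤ '9') ∨ PySem.Int.mod ((L.count i : Nat) : Int) 2 = 0) := by
  unfold pOddB oddB
  rw [ascDigit_le]
  by_cases h1 : ('0' ≤ i ∧ i ≤ '9') <;>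
    by_cases h2 : PySem.Int.mod ((L.count i : Nat) : Int) 2 = 0 <;> simp [h1]
  all_goals
    (by_cases hd : (2 : Int) ∣ ((L.count i : Nat) : Int) <;> simp [hd] <;> omega)

lemma rep_pt (L : List Char) (d : Char) :
    (if PySem.Int.mod ((L.count d : Nat) : Int) 2 ≠ 0 then
        PySem.List.pyRepeat [d] ((L.count d : Nat) : Int) else [])
      = List.replicate (fcnt L d) d := by
  unfold fcnt oddB
  by_cases h : PySem.Int.mod ((L.count d : Nat) : Int) 2 ≠ 0
  · rw [if_pos h, if_pos (by simpa using h), PySem.List.pyRepeat_singleton, Int.toNat_natCast]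
  · rw [if_neg h, if_neg (by simpa using h), List.replicate_zero]

-- ===== VERDICT (by name: the statement is the Claim_ definition above) =====
theorem asc_spec : Claim_equal_asc := by
  intro inpt _
  unfold Spec_asc
  simp only [asc, asc_alt]
  simp only [PySem.List.foldl_append_singleton_eq_self, List.nil_append]
  rw [BC_eq]
  simp only [getD_cnt]
  rw [sorted_eq]
  rw [PySem.List.foldl_append_singleton_eq_map]
  rw [PySem.List.foldl_append_eq_flatten]
  simp only [List.nil_append, List.flatten_append, List.map_map]
  simp only [Function.comp_def]
  rw [List.map_congr_left (fun x hx => toChars_dval x (mem_charYs _ x hx))]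
  rw [flatten_map_singleton, flatten_map_singleton]
  rw [PySem.List.foldl_append_ite
        (p := fun d => PySem.Int.mod ((inpt.toList.count d : Nat) : Int) 2 ≠ 0)
        (f := fun d => PySem.List.pyRepeat [d] ((inpt.toList.count d : Nat) : Int))]
  rw [List.nil_append, flatten_filter_map]
  have hd10 : "0123456789".toList = dchars := rfl
  have hf : (fun d => if decide (PySem.Int.mod ((inpt.toList.count d : Nat) : Int) 2 ≠ 0) = true then
        PySem.List.pyRepeat [d] ((inpt.toList.count d : Nat) : Int) else [])
      = (fun d => List.replicate (fcnt inpt.toList d) d) := by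
    funext d
    have := rep_pt inpt.toList d
    simpa using this
  rw [hd10, hf]
  have hrest : inpt.toList.filter (fun i => !pOddB inpt.toList i)
      = inpt.toList.filter (fun ch =>
          decide (¬('0' ≤ ch ∧ ch ≤ '9') ∨ PySem.Int.mod ((inpt.toList.count ch : Nat) : Int) 2 = 0)) := by
    apply List.filter_congr
    intro x _
    exact rest_pt inpt.toList x
  rw [hrest]
  rfl
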